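-- pv_equiv track=rewrite | github.com/ieeta-pt/Multi-Head-CRF | evaluation/preprocessing.py | spans_are_disjoint_and_sorted
-- ===== SOURCE A (Python) =====
-- def assert_valid_span(span):
--     assert isinstance(span, tuple)
--     assert len(span) == 2
--     begin, end = span
--     assert isinstance(begin, int) and (begin >= 0)
--     assert isinstance(end, int) and (end > begin)
--
-- def assert_valid_spans(spans):
--     assert isinstance(spans, list)
--     for s in spans:
--         assert_valid_span(s)
--
-- def spans_are_disjoint_and_sorted(spans):
--     assert_valid_spans(spans)
--     if len(spans) > 0:
--         previous_end = spans[0][1]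
--         for (begin, end) in spans[1:]:
--             if begin < previous_end:
--                 return False
--             previous_end = end
--     return True
-- ===== SOURCE B (Python) =====
-- def assert_valid_span(span):
--     assert isinstance(span, tuple)
--     assert len(span) == 2
--     begin, end = span
--     assert isinstance(begin, int) and (begin >= 0)
--     assert isinstance(end, int) and (end > begin)
--
-- def assert_valid_spans(spans):
--     assert isinstance(spans, list)
--     for s in spans:
--         assert_valid_span(s)
--
-- def spans_are_disjoint_and_sorted(spans):
--     assert_valid_spans(spans)
--     flat = [x for s in spans for x in s]
--     return flat == sorted(flat)
-- ===== Notes on version B (the rewrite author's own statement) =====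
-- stated objective: alternative
-- what changed: Replaces the explicit previous-end scan with flattening all endpoints into one list and comparing it with its sorted copy; validity (end > begin >= 0) makes non-decreasing endpoints exactly equivalent to disjoint-and-sorted.
import Mathlib
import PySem

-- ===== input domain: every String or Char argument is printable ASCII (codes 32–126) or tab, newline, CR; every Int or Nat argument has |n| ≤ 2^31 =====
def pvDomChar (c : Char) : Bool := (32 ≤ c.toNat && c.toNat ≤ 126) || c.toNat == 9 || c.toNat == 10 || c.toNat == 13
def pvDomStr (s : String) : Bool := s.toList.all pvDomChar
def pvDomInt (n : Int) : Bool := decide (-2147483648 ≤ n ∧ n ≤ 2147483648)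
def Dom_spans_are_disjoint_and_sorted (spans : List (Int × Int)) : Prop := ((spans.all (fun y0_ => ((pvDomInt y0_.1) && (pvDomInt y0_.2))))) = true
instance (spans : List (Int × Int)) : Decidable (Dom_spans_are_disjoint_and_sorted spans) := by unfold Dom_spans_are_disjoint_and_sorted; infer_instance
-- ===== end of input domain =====

-- B replaces A's previous-end scan with 'flattened endpoint list equals its sorted copy' (alternative decomposition, not faster).

-- ===== PORT A =====
-- the 'for (begin, end) in spans[1:]' loop carrying previous_end
def pvLoopA : List (Int × Int) → Int → Bool
  | [], _ => true
  | (b, e) :: t, prev => if b < prev then false else pvLoopA t e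

def spans_are_disjoint_and_sorted (spans : List (Int × Int)) : Bool :=
  match spans with
  | [] => true
  | (_, e0) :: rest => pvLoopA rest e0

-- ===== PORT B =====
def spans_are_disjoint_and_sorted_alt (spans : List (Int × Int)) : Bool :=
  let flat := spans.flatMap (fun s => [s.1, s.2])
  flat == PySem.List.sorted flat (fun x => x) false

-- ===== PRECONDITION & SPEC =====
-- Pre_ excludes exactly the spans on which A's assert_valid_spans raises AssertionError (begin < 0 or end ≤ begin); B raises identically there.
def Pre_spans_are_disjoint_and_sorted (spans : List (Int × Int)) : Prop :=
  ∀ s ∈ spans, 0 ≤ s.1 ∧ s.1 < s.2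
instance (spans : List (Int × Int)) : Decidable (Pre_spans_are_disjoint_and_sorted spans) := by unfold Pre_spans_are_disjoint_and_sorted; infer_instance

def pvWitness_spans_are_disjoint_and_sorted : (List (Int × Int)) := [(0, 2), (2, 5)]

def Spec_spans_are_disjoint_and_sorted (spans : List (Int × Int)) (out : Bool) : Prop := out = spans_are_disjoint_and_sorted_alt spans
instance (spans : List (Int × Int)) (out : Bool) : Decidable (Spec_spans_are_disjoint_and_sorted spans out) := by unfold Spec_spans_are_disjoint_and_sorted; infer_instance

-- ===== CLAIM (what is proved, stated in full; the proofs are below) =====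
def Claim_equal_spans_are_disjoint_and_sorted : Prop := ∀ (spans : List (Int × Int)), Dom_spans_are_disjoint_and_sorted spans → Pre_spans_are_disjoint_and_sorted spans → Spec_spans_are_disjoint_and_sorted spans (spans_are_disjoint_and_sorted spans)

-- ===== LEMMAS AND PROOFS =====

-- B's comparison 'flat == sorted(flat)' is exactly 'flat is non-decreasing'
theorem pvSortedEq_iff_pairwise (xs : List Int) :
    (PySem.List.sorted xs (fun x => x) false = xs) ↔ xs.Pairwise (· ≤ ·) := by
  constructor
  · intro h
    have := PySem.List.sorted_pairwise xs (fun x => x)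
    rw [h] at this
    exact this
  · intro h
    exact PySem.List.sorted_eq_self_of_pairwise xs (fun x => x) h

-- A's loop agrees with the chain condition on the flattened endpoints, given validity
theorem pvLoopA_iff_chain (t : List (Int × Int)) (prev : Int)
    (hv : ∀ s ∈ t, 0 ≤ s.1 ∧ s.1 < s.2) :
    pvLoopA t prev = true ↔ List.IsChain (· ≤ ·) (prev :: t.flatMap (fun s => [s.1, s.2])) := by
  induction t generalizing prev with
  | nil => simp [pvLoopA]
  | cons hd tl ih =>
    obtain ⟨b, e⟩ := hd
    have hbe : b < e := (hv (b, e) (by simp)).2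
    have hv' : ∀ s ∈ tl, 0 ≤ s.1 ∧ s.1 < s.2 := fun s hs => hv s (by simp [hs])
    simp only [pvLoopA, List.flatMap_cons, List.cons_append, List.nil_append,
      List.isChain_cons_cons]
    constructor
    · intro h
      split_ifs at h with hlt
      exact ⟨by omega, by omega, (ih e hv').mp h⟩
    · rintro ⟨h1, h2, h3⟩
      rw [if_neg (by omega)]
      exact (ih e hv').mpr h3

theorem spans_equiv (spans : List (Int × Int))
    (hv : ∀ s ∈ spans, 0 ≤ s.1 ∧ s.1 < s.2) :
    spans_are_disjoint_and_sorted spans = spans_are_disjoint_and_sorted_alt spans := by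
  cases spans with
  | nil => decide
  | cons hd rest =>
    obtain ⟨b0, e0⟩ := hd
    show pvLoopA rest e0 = _
    unfold spans_are_disjoint_and_sorted_alt
    have hbe : b0 < e0 := (hv (b0, e0) (by simp)).2
    have hv' : ∀ s ∈ rest, 0 ≤ s.1 ∧ s.1 < s.2 := fun s hs => hv s (by simp [hs])
    have key : pvLoopA rest e0 = true ↔
        (((b0, e0) :: rest).flatMap (fun s => [s.1, s.2])).Pairwise (· ≤ ·) := by
      rw [← List.isChain_iff_pairwise, pvLoopA_iff_chain rest e0 hv']
      simp only [List.flatMap_cons, List.cons_append, List.nil_append,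
        List.isChain_cons_cons]
      constructor
      · exact fun h => ⟨by omega, h⟩
      · exact fun h => h.2
    by_cases h : pvLoopA rest e0 = true
    · have hpw := key.mp h
      rw [h]
      symm
      rw [beq_iff_eq, ((pvSortedEq_iff_pairwise _).mpr hpw)]
    · rw [Bool.eq_false_iff.mpr h]
      symm
      rw [Bool.eq_false_iff]
      intro hEq
      exact h (key.mpr ((pvSortedEq_iff_pairwise _).mp (beq_iff_eq.mp hEq).symm))

-- ===== VERDICT (by name: the statement is the Claim_ definition above) =====
theorem spans_are_disjoint_and_sorted_spec : Claim_equal_spans_are_disjoint_and_sorted := by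
  intro spans _ hpre
  unfold Spec_spans_are_disjoint_and_sorted
  exact spans_equiv spans hpre
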